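-- pv_equiv track=rewrite | github.com/noah-mclain/Jarvis-AI-Assistant | src/generative_ai_module/improved_preprocessing.py | segment_by_dialogue_turns
-- ===== SOURCE A (Python) =====
-- def segment_by_dialogue_turns(text):
--     """Segment text into dialogue turns for better context modeling"""
--     segments = []
--     current_segment = []
--
--     for line in text.split('\n'):
--         if (line.startswith('USER:') or line.startswith('ASSISTANT:')) and current_segment:
--             segments.append('\n'.join(current_segment))
--             current_segment = []
--
--         if line.strip():
--             current_segment.append(line)
--
--     # Add the last segment
--     if current_segment:
--         segments.append('\n'.join(current_segment))
--
--     return segments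
-- ===== SOURCE B (Python) =====
-- def _is_marker(line):
--     return line.startswith('USER:') or line.startswith('ASSISTANT:')
--
--
-- def _chunks(ls):
--     # recursively cut the (blank-free) line list just before each marker line
--     if not ls:
--         return []
--     k = 1
--     while k < len(ls) and not _is_marker(ls[k]):
--         k += 1
--     return ['\n'.join(ls[:k])] + _chunks(ls[k:])
--
--
-- def segment_by_dialogue_turns(text):
--     """Segment text into dialogue turns for better context modeling"""
--     lines = [l for l in text.split('\n') if l.strip()]
--     return _chunks(lines)
-- ===== Notes on version B (the rewrite author's own statement) =====
-- stated objective: alternative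
-- what changed: Replaces A's accumulate-and-flush single pass (mutable current-segment buffer flushed at each marker) by a two-phase shape: first filter out blank lines, then recursively cut the blank-free line list just before each USER:/ASSISTANT: marker and join each chunk.
import Mathlib
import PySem

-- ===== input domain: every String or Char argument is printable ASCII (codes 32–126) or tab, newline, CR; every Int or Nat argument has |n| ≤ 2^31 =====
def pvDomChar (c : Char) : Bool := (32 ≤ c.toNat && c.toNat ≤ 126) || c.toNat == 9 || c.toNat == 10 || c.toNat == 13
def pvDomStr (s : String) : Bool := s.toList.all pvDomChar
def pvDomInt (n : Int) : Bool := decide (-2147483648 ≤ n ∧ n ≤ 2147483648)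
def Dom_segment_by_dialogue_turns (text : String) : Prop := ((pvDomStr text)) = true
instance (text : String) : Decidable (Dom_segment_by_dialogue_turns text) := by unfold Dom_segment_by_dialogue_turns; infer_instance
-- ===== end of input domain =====

-- B replaces A's accumulate-and-flush pass by filtering blank lines then recursively cutting before each marker line (objective: alternative decomposition, same cost).


-- ===== PORT A =====
def segAStep (st : List (List Char) × List (List Char)) (line : List Char) :
    List (List Char) × List (List Char) :=
  let st1 :=
    if (PySem.Chars.startswith line "USER:".toList
        || PySem.Chars.startswith line "ASSISTANT:".toList) && !st.2.isEmpty then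
      (st.1 ++ [PySem.Chars.join ['\n'] st.2], [])
    else st
  if PySem.Chars.strip line ≠ [] then (st1.1, st1.2 ++ [line]) else st1

def segFinish (st : List (List Char) × List (List Char)) : List (List Char) :=
  if st.2 ≠ [] then st.1 ++ [PySem.Chars.join ['\n'] st.2] else st.1

def segment_by_dialogue_turns (text : String) : List String :=
  let lines := PySem.Chars.splitOn text.toList ['\n']
  (segFinish (lines.foldl segAStep ([], []))).map String.ofList

-- ===== PORT B =====
def pvIsMarker (l : List Char) : Bool :=
  PySem.Chars.startswith l "USER:".toList || PySem.Chars.startswith l "ASSISTANT:".toList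

def pvChunks : List (List Char) → List (List Char)
  | [] => []
  | l :: ls =>
    PySem.Chars.join ['\n'] (l :: ls.takeWhile (fun x => !pvIsMarker x))
      :: pvChunks (ls.dropWhile (fun x => !pvIsMarker x))
termination_by ls => ls.length
decreasing_by
  simpa using Nat.lt_succ_of_le (List.length_dropWhile_le _ _)

def segment_by_dialogue_turns_alt (text : String) : List String :=
  let lines := (PySem.Chars.splitOn text.toList ['\n']).filter
      (fun l => !(PySem.Chars.strip l).isEmpty)
  (pvChunks lines).map String.ofList

-- ===== PRECONDITION & SPEC =====
def Spec_segment_by_dialogue_turns (text : String) (out : List String) : Prop := out = segment_by_dialogue_turns_alt text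
instance (text : String) (out : List String) : Decidable (Spec_segment_by_dialogue_turns text out) := by unfold Spec_segment_by_dialogue_turns; infer_instance

-- ===== CLAIM (what is proved, stated in full; the proofs are below) =====
def Claim_equal_segment_by_dialogue_turns : Prop := ∀ (text : String), Dom_segment_by_dialogue_turns text → Spec_segment_by_dialogue_turns text (segment_by_dialogue_turns text)

-- ===== LEMMAS AND PROOFS =====


-- a line whose strip is empty cannot start with a non-space character
lemma blank_no_prefix (l : List Char) (h : PySem.Chars.strip l = []) (c : Char) (p : List Char)
    (hc : PySem.Chars.isspace c = false) : PySem.Chars.startswith l (c :: p) = false := by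
  by_contra hx
  rw [Bool.not_eq_false, PySem.Chars.startswith_iff] at hx
  obtain ⟨r, hr⟩ := hx
  have hdw : l.dropWhile PySem.Chars.isspace = l := by
    rw [← hr]
    simp [hc]
  have hall : ∀ x ∈ l.dropWhile PySem.Chars.isspace, PySem.Chars.isspace x = true := by
    simp only [PySem.Chars.strip, PySem.Chars.rstrip, PySem.Chars.lstrip] at h
    rw [List.reverse_eq_nil_iff, List.dropWhile_eq_nil_iff] at h
    intro x hx; exact h x (List.mem_reverse.2 hx)
  have hcmem : c ∈ l.dropWhile PySem.Chars.isspace := by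
    rw [hdw, ← hr]; simp
  have := hall c hcmem
  rw [hc] at this
  exact absurd this (by simp)

-- a fully-blank line cannot start with a dialogue marker
lemma blank_not_marker (l : List Char) (h : PySem.Chars.strip l = []) :
    (PySem.Chars.startswith l "USER:".toList
      || PySem.Chars.startswith l "ASSISTANT:".toList) = false := by
  rw [show "USER:".toList = 'U' :: "SER:".toList from rfl,
      show "ASSISTANT:".toList = 'A' :: "SSISTANT:".toList from rfl,
      blank_no_prefix l h 'U' _ (by decide), blank_no_prefix l h 'A' _ (by decide)]
  rfl

-- blank lines are no-ops for A's loop: folding over all lines = folding over the non-blank ones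
lemma foldl_filter_blank (lines : List (List Char)) (st : List (List Char) × List (List Char)) :
    lines.foldl segAStep st
      = (lines.filter (fun l => !(PySem.Chars.strip l).isEmpty)).foldl segAStep st := by
  induction lines generalizing st with
  | nil => rfl
  | cons l t ih =>
    by_cases hb : PySem.Chars.strip l = []
    · have hstep : segAStep st l = st := by
        unfold segAStep
        rw [blank_not_marker l hb]
        simp [hb]
      simp only [List.filter_cons, hb, List.isEmpty_nil, Bool.not_true, List.foldl_cons, hstep]
      simpa using ih st
    · have hkeep : (!(PySem.Chars.strip l).isEmpty) = true := by
        simp [hb]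
      simp only [List.filter_cons, hkeep, if_pos, List.foldl_cons]
      exact ih _

-- equation lemmas for pvChunks (defined by well-founded recursion)
lemma pvChunks_nil : pvChunks [] = [] := by rw [pvChunks.eq_def]

lemma pvChunks_cons (l : List Char) (ls : List (List Char)) :
    pvChunks (l :: ls)
      = PySem.Chars.join ['\n'] (l :: ls.takeWhile (fun x => !pvIsMarker x))
          :: pvChunks (ls.dropWhile (fun x => !pvIsMarker x)) := by
  rw [pvChunks.eq_def]

-- loop invariant: with a nonempty buffer, finishing A's fold produces the pending chunk then pvChunks
lemma foldl_chunks (ls : List (List Char)) :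
    ∀ (segs cur : List (List Char)), cur ≠ [] →
      (∀ l ∈ ls, PySem.Chars.strip l ≠ []) →
      segFinish (ls.foldl segAStep (segs, cur))
        = segs ++ (PySem.Chars.join ['\n'] (cur ++ ls.takeWhile (fun x => !pvIsMarker x))
            :: pvChunks (ls.dropWhile (fun x => !pvIsMarker x))) := by
  induction ls with
  | nil =>
    intro segs cur hcur _
    simp [segFinish, hcur, pvChunks_nil]
  | cons l ls ih =>
    intro segs cur hcur hall
    have hnb : PySem.Chars.strip l ≠ [] := hall l (by simp)
    have hall' : ∀ x ∈ ls, PySem.Chars.strip x ≠ [] :=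
      fun x hx => hall x (List.mem_cons_of_mem _ hx)
    by_cases hm : pvIsMarker l = true
    · have hstep : segAStep (segs, cur) l = (segs ++ [PySem.Chars.join ['\n'] cur], [l]) := by
        have hcond : ((PySem.Chars.startswith l "USER:".toList
            || PySem.Chars.startswith l "ASSISTANT:".toList) && !cur.isEmpty) = true := by
          have he : cur.isEmpty = false := by simpa [List.isEmpty_iff] using hcur
          rw [show (PySem.Chars.startswith l "USER:".toList
            || PySem.Chars.startswith l "ASSISTANT:".toList) = pvIsMarker l from rfl, hm, he]
          rfl
        unfold segAStep
        rw [hcond]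
        simp [hnb]
      have htw : List.takeWhile (fun x => !pvIsMarker x) (l :: ls) = [] := by
        simp [hm]
      have hdw : List.dropWhile (fun x => !pvIsMarker x) (l :: ls) = l :: ls := by
        simp [hm]
      rw [List.foldl_cons, hstep, ih _ _ (by simp) hall', htw, hdw, pvChunks_cons]
      simp
    · have hm' : pvIsMarker l = false := by simpa using hm
      have hstep : segAStep (segs, cur) l = (segs, cur ++ [l]) := by
        have hcond : ((PySem.Chars.startswith l "USER:".toList
            || PySem.Chars.startswith l "ASSISTANT:".toList) && !cur.isEmpty) = false := by
          rw [show (PySem.Chars.startswith l "USER:".toList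
            || PySem.Chars.startswith l "ASSISTANT:".toList) = pvIsMarker l from rfl, hm']
          rfl
        unfold segAStep
        rw [hcond]
        simp [hnb]
      have htw : List.takeWhile (fun x => !pvIsMarker x) (l :: ls)
          = l :: List.takeWhile (fun x => !pvIsMarker x) ls := by
        simp [hm']
      have hdw : List.dropWhile (fun x => !pvIsMarker x) (l :: ls)
          = List.dropWhile (fun x => !pvIsMarker x) ls := by
        simp [hm']
      rw [List.foldl_cons, hstep, ih _ _ (by simp) hall', htw, hdw]
      simp [List.append_assoc]

-- ===== VERDICT (by name: the statement is the Claim_ definition above) =====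
theorem segment_by_dialogue_turns_spec : Claim_equal_segment_by_dialogue_turns := by
  intro text _
  unfold Spec_segment_by_dialogue_turns segment_by_dialogue_turns segment_by_dialogue_turns_alt
  simp only []
  rw [foldl_filter_blank]
  have hnb : ∀ l ∈ (PySem.Chars.splitOn text.toList ['\n']).filter
      (fun l => !(PySem.Chars.strip l).isEmpty), PySem.Chars.strip l ≠ [] := by
    intro l hl
    have := List.of_mem_filter hl
    simpa [List.isEmpty_iff] using this
  cases hfl : (PySem.Chars.splitOn text.toList ['\n']).filter
      (fun l => !(PySem.Chars.strip l).isEmpty) with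
  | nil => simp [segFinish, pvChunks_nil]
  | cons l ls =>
    have hnb' := hfl ▸ hnb
    have hstep : segAStep ([], []) l = ([], [l]) := by
      simp [segAStep, hnb' l (by simp)]

    rw [List.foldl_cons, hstep,
      foldl_chunks ls [] [l] (by simp) (fun x hx => hnb' x (List.mem_cons_of_mem _ hx)),
      pvChunks_cons]
    simp
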